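-- pv_equiv track=rewrite | github.com/MarkMuinde/Artificial-Intelligence-COMP2611 | queen_cover.py | cols_used
-- ===== SOURCE A (Python) =====
-- def cols_used(state):
--     number = 0
--     for j in range(len(state[0])):
--         coltotal = 0
--         for i in range(len(state)):
--             if state[i][j] == 2:
--                 coltotal += 1
--         if coltotal > 0:
--             number += 1
--     return number
-- ===== SOURCE B (Python) =====
-- def cols_used(state):
--     width = len(state[0])
--     used = set()
--     for row in state:
--         for j in range(width):
--             if row[j] == 2:
--                 used.add(j)
--     return len(used)
-- ===== Notes on version B (the rewrite author's own statement) =====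
-- stated objective: idiomatic
-- what changed: Flips the traversal to row-major and replaces per-column counters with a set of column indices that contain a 2, returning the set's size.
import Mathlib
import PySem

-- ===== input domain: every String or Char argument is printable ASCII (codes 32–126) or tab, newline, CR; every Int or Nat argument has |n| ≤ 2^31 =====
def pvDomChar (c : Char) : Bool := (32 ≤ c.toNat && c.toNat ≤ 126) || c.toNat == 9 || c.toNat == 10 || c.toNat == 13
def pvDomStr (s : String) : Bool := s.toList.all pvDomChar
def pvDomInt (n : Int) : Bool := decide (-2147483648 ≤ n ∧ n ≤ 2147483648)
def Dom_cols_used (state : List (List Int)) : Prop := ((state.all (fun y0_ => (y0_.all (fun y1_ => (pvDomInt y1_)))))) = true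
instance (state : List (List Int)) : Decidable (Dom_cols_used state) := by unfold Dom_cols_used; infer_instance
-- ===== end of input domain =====

-- B flips A's traversal to row-major and collects the column indices that contain a 2 into a set,
-- returning the set's size (idiomatic restructuring; same asymptotic cost).


-- ===== PORT A =====
def cols_used (state : List (List Int)) : Int :=
  (PySem.List.pyRange 0 ((PySem.List.pyGetD state 0 []).length : Int) 1).foldl
    (fun number j =>
      let coltotal : Int :=
        (PySem.List.pyRange 0 (state.length : Int) 1).foldl
          (fun ct i => if PySem.List.pyGetD (PySem.List.pyGetD state i []) j 0 = 2 then ct + 1 else ct) 0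
      if coltotal > 0 then number + 1 else number) 0

-- ===== PORT B =====
def cols_used_alt (state : List (List Int)) : Int :=
  let width : Int := ((PySem.List.pyGetD state 0 []).length : Int)
  let used : PySem.Set Int :=
    state.foldl
      (fun used row =>
        (PySem.List.pyRange 0 width 1).foldl
          (fun u j => if PySem.List.pyGetD row j 0 = 2 then PySem.Set.add u j else u) used)
      PySem.Set.empty
  (used.length : Int)

-- ===== PRECONDITION & SPEC =====
-- Pre_ excludes exactly the inputs where the Python A raises IndexError: the empty grid
-- (state[0] fails) and ragged grids with a row shorter than the first row.
def Pre_cols_used (state : List (List Int)) : Prop :=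
  state ≠ [] ∧ ∀ row ∈ state, (state.headD []).length ≤ row.length
instance (state : List (List Int)) : Decidable (Pre_cols_used state) := by unfold Pre_cols_used; infer_instance
def pvWitness_cols_used : List (List Int) := [[2, 0, 1], [0, 0, 2]]

def Spec_cols_used (state : List (List Int)) (out : Int) : Prop := out = cols_used_alt state
instance (state : List (List Int)) (out : Int) : Decidable (Spec_cols_used state out) := by unfold Spec_cols_used; infer_instance

-- ===== CLAIM (what is proved, stated in full; the proofs are below) =====
def Claim_equal_cols_used : Prop := ∀ (state : List (List Int)), Dom_cols_used state → Pre_cols_used state → Spec_cols_used state (cols_used state)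

-- ===== LEMMAS AND PROOFS =====

-- A's inner loop is a count of the rows hitting column j.
theorem colsA_inner (j : Int) (rows : List (List Int)) (c : Int) :
    rows.foldl (fun ct row => if PySem.List.pyGetD row j 0 = 2 then ct + 1 else ct) c
      = c + (rows.countP (fun row => PySem.List.pyGetD row j 0 == 2) : Int) := by
  induction rows generalizing c with
  | nil => simp
  | cons r rs ih =>
    by_cases h : PySem.List.pyGetD r j 0 = 2
    · simp [h, ih]; ring
    · simp [h, ih]

-- A's inner index loop over range(len(state)) equals a count over the rows.
theorem colsA_idx (state : List (List Int)) (j : Int) :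
    (PySem.List.pyRange 0 (state.length : Int) 1).foldl
        (fun ct i => if PySem.List.pyGetD (PySem.List.pyGetD state i []) j 0 = 2 then ct + 1 else ct) 0
      = (state.countP (fun row => PySem.List.pyGetD row j 0 == 2) : Int) := by
  rw [PySem.List.foldl_pyRange_zero_pyGetD' state []
      (fun ct row => if PySem.List.pyGetD row j 0 = 2 then ct + 1 else ct) 0,
    colsA_inner, zero_add]

-- A's outer loop counts (as filter length) the j with a positive column count.
theorem colsA_outer (state : List (List Int)) (l : List Int) (n : Int) :
    l.foldl (fun number j =>
        if (state.countP (fun row => PySem.List.pyGetD row j 0 == 2) : Int) > 0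
        then number + 1 else number) n
      = n + ((l.filter (fun j => state.any (fun row => PySem.List.pyGetD row j 0 == 2))).length : Int) := by
  induction l generalizing n with
  | nil => simp
  | cons x xs ih =>
    have hiff : ((state.countP (fun row => PySem.List.pyGetD row x 0 == 2) : Int) > 0)
        ↔ state.any (fun row => PySem.List.pyGetD row x 0 == 2) = true := by
      constructor
      · intro h
        have : 0 < state.countP (fun row => PySem.List.pyGetD row x 0 == 2) := by exact_mod_cast h
        rcases List.countP_pos_iff.mp this with ⟨r, hr, hp⟩
        exact List.any_eq_true.mpr ⟨r, hr, hp⟩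
      · intro h
        rcases List.any_eq_true.mp h with ⟨r, hr, hp⟩
        have : 0 < state.countP (fun row => PySem.List.pyGetD row x 0 == 2) :=
          List.countP_pos_iff.mpr ⟨r, hr, hp⟩
        exact_mod_cast this
    by_cases h : state.any (fun row => PySem.List.pyGetD row x 0 == 2) = true
    · rw [List.foldl_cons, if_pos (hiff.mpr h), ih]
      simp only [List.filter_cons, h, if_pos, List.length_cons]
      push_cast; ring
    · rw [List.foldl_cons, if_neg (fun hh => h (hiff.mp hh)), ih]
      simp only [List.filter_cons, h, Bool.false_eq_true, if_false]

-- membership in B's inner fold over one row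
theorem colsB_inner_mem (row : List Int) (l : List Int) (s : PySem.Set Int) (y : Int) :
    y ∈ l.foldl (fun u j => if PySem.List.pyGetD row j 0 = 2 then PySem.Set.add u j else u) s
      ↔ y ∈ s ∨ (y ∈ l ∧ PySem.List.pyGetD row y 0 = 2) := by
  induction l generalizing s with
  | nil => simp
  | cons x xs ih =>
    by_cases h : PySem.List.pyGetD row x 0 = 2
    · simp only [List.foldl_cons, if_pos h, ih, PySem.Set.mem_add, List.mem_cons]
      constructor
      · rintro (⟨hy | rfl⟩ | hy)
        · exact Or.inl hy
        · exact Or.inr ⟨Or.inl rfl, h⟩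
        · exact Or.inr ⟨Or.inr hy.1, hy.2⟩
      · rintro (hy | ⟨(rfl | hy), h2⟩)
        · exact Or.inl (Or.inl hy)
        · exact Or.inl (Or.inr rfl)
        · exact Or.inr ⟨hy, h2⟩
    · simp only [List.foldl_cons, if_neg h, ih, List.mem_cons]
      constructor
      · rintro (hy | hy)
        · exact Or.inl hy
        · exact Or.inr ⟨Or.inr hy.1, hy.2⟩
      · rintro (hy | ⟨(rfl | hy), h2⟩)
        · exact Or.inl hy
        · exact absurd h2 h
        · exact Or.inr ⟨hy, h2⟩

theorem colsB_inner_nodup (row : List Int) (l : List Int) (s : PySem.Set Int) (hs : s.Nodup) :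
    (l.foldl (fun u j => if PySem.List.pyGetD row j 0 = 2 then PySem.Set.add u j else u) s).Nodup := by
  induction l generalizing s with
  | nil => exact hs
  | cons x xs ih =>
    by_cases h : PySem.List.pyGetD row x 0 = 2
    · simpa [h] using ih _ (PySem.Set.nodup_add _ _ hs)
    · simpa [h] using ih _ hs

-- membership in B's full fold
theorem colsB_mem (w : Int) (rows : List (List Int)) (s : PySem.Set Int) (y : Int) :
    y ∈ rows.foldl
        (fun used row =>
          (PySem.List.pyRange 0 w 1).foldl
            (fun u j => if PySem.List.pyGetD row j 0 = 2 then PySem.Set.add u j else u) used) s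
      ↔ y ∈ s ∨ (y ∈ PySem.List.pyRange 0 w 1 ∧ ∃ row ∈ rows, PySem.List.pyGetD row y 0 = 2) := by
  induction rows generalizing s with
  | nil => simp
  | cons r rs ih =>
    simp only [List.foldl_cons, ih, colsB_inner_mem, List.mem_cons]
    constructor
    · rintro ((hy | ⟨h1, h2⟩) | ⟨h1, r', hr', h2⟩)
      · exact Or.inl hy
      · exact Or.inr ⟨h1, r, Or.inl rfl, h2⟩
      · exact Or.inr ⟨h1, r', Or.inr hr', h2⟩
    · rintro (hy | ⟨h1, r', (rfl | hr'), h2⟩)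
      · exact Or.inl (Or.inl hy)
      · exact Or.inl (Or.inr ⟨h1, h2⟩)
      · exact Or.inr ⟨h1, r', hr', h2⟩

theorem colsB_nodup (w : Int) (rows : List (List Int)) (s : PySem.Set Int) (hs : s.Nodup) :
    (rows.foldl
        (fun used row =>
          (PySem.List.pyRange 0 w 1).foldl
            (fun u j => if PySem.List.pyGetD row j 0 = 2 then PySem.Set.add u j else u) used) s).Nodup := by
  induction rows generalizing s with
  | nil => exact hs
  | cons r rs ih => exact ih _ (colsB_inner_nodup r _ s hs)

-- ===== VERDICT (by name: the statement is the Claim_ definition above) =====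
theorem cols_used_spec : Claim_equal_cols_used := by
  intro state _ _
  unfold Spec_cols_used cols_used cols_used_alt
  -- A side: rewrite the inner index loop into a fold over the rows, then count
  simp only [colsA_idx]
  rw [colsA_outer]
  -- B side: the set is a permutation of the filtered range
  set w : Int := ((PySem.List.pyGetD state 0 []).length : Int) with hw
  set used : PySem.Set Int :=
    state.foldl
      (fun used row =>
        (PySem.List.pyRange 0 w 1).foldl
          (fun u j => if PySem.List.pyGetD row j 0 = 2 then PySem.Set.add u j else u) used)
      PySem.Set.empty with hused
  have hnd : used.Nodup := colsB_nodup w state PySem.Set.empty (by simp [PySem.Set.empty])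
  have hperm : used.Perm
      ((PySem.List.pyRange 0 w 1).filter
        (fun j => state.any (fun row => PySem.List.pyGetD row j 0 == 2))) := by
    refine (List.perm_ext_iff_of_nodup hnd ?_).mpr ?_
    · exact (PySem.List.nodup_pyRange_one 0 w).filter _
    · intro y
      rw [hused, colsB_mem, List.mem_filter]
      simp [PySem.Set.empty, List.any_eq_true]
  rw [zero_add, hperm.length_eq]
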